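-- pv_equiv track=rewrite | github.com/nobodywasishere/MLCSim | MLCSim/configs.py | _part
-- ===== SOURCE A (Python) =====
-- from itertools import combinations
-- from typing import Dict, Generator, List, Tuple, Union
--
-- def _part(
--     agents: List[int], items: List[int]
-- ) -> Generator[Dict[int, List[int]], None, None]:
--     if len(agents) == 1:
--         yield {agents[0]: items}
--     else:
--         quota = len(items) // len(agents)
--         for indexes in combinations(range(len(items)), quota):
--             # Don't move the 0 from the 0th agent
--             if indexes[0] != 0:
--                 continue
--             remainder = items[:]
--             selection = [remainder.pop(i) for i in reversed(indexes)][::-1]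
--             for result in _part(agents[1:], remainder):
--                 result[agents[0]] = selection
--                 yield result
-- ===== SOURCE B (Python) =====
-- from itertools import combinations
--
--
-- def _part(agents, items):
--     # Iterative breadth-first expansion instead of recursion: a worklist of
--     # partial states (remaining items, assigned (agent, selection) pairs),
--     # expanded once per agent; each dict is built once at the end.
--     states = [(items, [])]
--     k = len(agents)  # agents not yet assigned
--     for agent in agents[:-1]:
--         new_states = []
--         for rem, acc in states:
--             quota = len(rem) // k
--             # item 0 stays with this agent: choose quota-1 partners from 1..
--             for others in combinations(range(1, len(rem)), quota - 1):
--                 idx = {0, *others}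
--                 sel = [rem[i] for i in sorted(idx)]
--                 rest = [x for i, x in enumerate(rem) if i not in idx]
--                 new_states.append((rest, [(agent, sel)] + acc))
--         states = new_states
--         k -= 1
--     last = agents[-1]
--     for rem, acc in states:
--         yield dict([(last, rem)] + acc)
-- ===== Notes on version B (the rewrite author's own statement) =====
-- stated objective: alternative
-- what changed: B replaces A's recursive generator (all C(n,quota) combinations filtered on the first index, selections extracted by repeated list.pop, dicts mutated key-by-key up the recursion) with a non-recursive breadth-first worklist: partial states (remaining items, assigned pairs) are expanded once per agent by enumerating only the combinations containing index 0, and each result dict is built once from its pair list at the end.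
-- outside the precondition, e.g. on _part([], [1]): A raises ZeroDivisionError, B raises IndexError; on _part([1, 2], [7]): A raises IndexError, B raises ValueError
import Mathlib
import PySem

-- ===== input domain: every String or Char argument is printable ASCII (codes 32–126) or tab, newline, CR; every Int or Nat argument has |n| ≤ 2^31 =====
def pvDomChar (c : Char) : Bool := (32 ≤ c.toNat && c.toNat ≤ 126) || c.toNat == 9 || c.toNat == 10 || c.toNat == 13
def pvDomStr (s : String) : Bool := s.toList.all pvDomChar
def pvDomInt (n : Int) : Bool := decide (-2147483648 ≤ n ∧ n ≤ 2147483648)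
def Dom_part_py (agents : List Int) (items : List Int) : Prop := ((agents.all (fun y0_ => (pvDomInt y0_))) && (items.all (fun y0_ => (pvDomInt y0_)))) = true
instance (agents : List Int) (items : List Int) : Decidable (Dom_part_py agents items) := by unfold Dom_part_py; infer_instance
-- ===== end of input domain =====

-- B replaces A's recursive generator (combinations filtered on the first index, selections
-- extracted by repeated pops, dicts mutated up the recursion) by an iterative breadth-first
-- worklist of partial states expanded once per agent, with each dict built once at the end
-- (objective: alternative; equal results, proved equal on Pre_).

-- ===== PORT A =====
-- step of the comprehension '[remainder.pop(i) for i in reversed(indexes)]':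
-- state is (popped values so far, remainder); 'none' = IndexError, never reached on the
-- lists the fold is applied to (combination indices are distinct and in range)
def partPopStep (st : List Int × List Int) (i : Int) : List Int × List Int :=
  match PySem.List.pop? st.2 i with
  | some (v, rest) => (st.1 ++ [v], rest)
  | none => st

def part_py : List Int → List Int → List (List (Int × List Int))
  | [], _ => []  -- Python raises ZeroDivisionError (len(agents) == 0); excluded by Pre_part_py
  | [a], items => [[(a, items)]]
  | a :: a2 :: rest, items =>
    let quota : Int := PySem.Int.floordiv (PySem.List.len items) (PySem.List.len (a :: a2 :: rest))
    (PySem.List.combinations (PySem.List.pyRange 0 (PySem.List.len items) 1) quota.toNat).foldl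
      (fun acc indexes =>
        match PySem.List.pyGet? indexes 0 with
        | none => acc  -- Python raises IndexError (quota == 0); excluded by Pre_part_py
        | some i0 =>
          if i0 ≠ 0 then acc
          else
            let st := indexes.reverse.foldl partPopStep ([], items)
            let selection := (PySem.List.slice? st.1 none none (-1)).getD []  -- [::-1]
            acc ++ (part_py (a2 :: rest) st.2).map
              (fun result => (PySem.Dict.insert ⟨result⟩ a selection).items))
      []

-- ===== PORT B =====
-- one level of B's worklist expansion: every successor state of (rem, acc) for `agent`,
-- while k agents (this one included) are still unassigned
def altExpand (k : Int) (agent : Int) (st : List Int × List (Int × List Int)) :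
    List (List Int × List (Int × List Int)) :=
  let quota : Int := PySem.Int.floordiv (PySem.List.len st.1) k
  -- combinations(range(1, len(rem)), quota - 1); inside Pre_ quota ≥ 1, so '.toNat' is
  -- exact (Python's combinations raises ValueError on a negative r, excluded by Pre_)
  (PySem.List.combinations (PySem.List.pyRange 1 (PySem.List.len st.1) 1) (quota - 1).toNat).map
    (fun others =>
      let idx := PySem.Set.add (PySem.Set.ofList others) (0 : Int)
      let sel := (PySem.List.sorted idx (fun i => i) false).map
        (fun i => PySem.List.pyGetD st.1 i 0)  -- rem[i]; every i is in range here
      let rest := ((PySem.List.enumerate st.1 0).filter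
        (fun p => !PySem.Set.contains idx p.1)).map (·.2)
      (rest, (agent, sel) :: st.2))

def part_py_alt (agents : List Int) (items : List Int) : List (List (Int × List Int)) :=
  -- 'for agent in agents[:-1]' with the two loop accumulators (states, k)
  let fin := ((PySem.List.slice agents none (some (-1))).foldl
      (fun (p : List (List Int × List (Int × List Int)) × Int) agent =>
        (p.1.foldl (fun ns st => ns ++ altExpand p.2 agent st) [], p.2 - 1))
      ([(items, [])], PySem.List.len agents)).1
  match PySem.List.pyGet? agents (-1) with
  | none => []  -- agents == []: Python raises IndexError on agents[-1]; excluded by Pre_part_py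
  | some last => fin.map (fun st => (PySem.Dict.ofList ((last, st.1) :: st.2)).items)

-- ===== PRECONDITION & SPEC =====
-- Pre_ excludes exactly the inputs where A raises: agents == [] (ZeroDivisionError) and
-- 2 ≤ len(agents) with len(items) < len(agents) (quota == 0, so indexes[0] is IndexError).
def Pre_part_py (agents : List Int) (items : List Int) : Prop :=
  agents ≠ [] ∧ (agents.length = 1 ∨ agents.length ≤ items.length)
instance (agents : List Int) (items : List Int) : Decidable (Pre_part_py agents items) := by
  unfold Pre_part_py; infer_instance

def pvWitness_part_py : List Int × List Int := ([1, 2], [10, 20, 30, 40])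

def Spec_part_py (agents : List Int) (items : List Int) (out : List (List (Int × List Int))) : Prop := out = part_py_alt agents items
instance (agents : List Int) (items : List Int) (out : List (List (Int × List Int))) : Decidable (Spec_part_py agents items out) := by unfold Spec_part_py; infer_instance

-- ===== CLAIM (what is proved, stated in full; the proofs are below) =====
def Claim_equal_part_py : Prop := ∀ (agents : List Int) (items : List Int), Dom_part_py agents items → Pre_part_py agents items → Spec_part_py agents items (part_py agents items)

-- ===== LEMMAS AND PROOFS =====

-- B's loop, as a function of the (already sliced) agent list, the counter and the worklist
def altStep (p : List (List Int × List (Int × List Int)) × Int) (agent : Int) :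
    List (List Int × List (Int × List Int)) × Int :=
  (p.1.foldl (fun ns st => ns ++ altExpand p.2 agent st) [], p.2 - 1)

def runB (ags : List Int) (k : Int) (S : List (List Int × List (Int × List Int))) :
    List (List Int × List (Int × List Int)) :=
  (ags.foldl altStep (S, k)).1

theorem part_py_alt_eq (agents : List Int) (items : List Int) :
    part_py_alt agents items =
      match PySem.List.pyGet? agents (-1) with
      | none => []
      | some last =>
        (runB agents.dropLast ((agents.length : Nat) : Int) [(items, [])]).map
          (fun st => (PySem.Dict.ofList ((last, st.1) :: st.2)).items) := by
  unfold part_py_alt runB altStep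
  rw [PySem.List.slice_to_neg_one, PySem.List.len_eq]

theorem runB_cons (a : Int) (ags : List Int) (k : Int)
    (S : List (List Int × List (Int × List Int))) :
    runB (a :: ags) k S = runB ags (k - 1) (S.flatMap (altExpand k a)) := by
  unfold runB
  rw [List.foldl_cons]
  have : altStep (S, k) a = (S.flatMap (altExpand k a), k - 1) := by
    unfold altStep
    rw [PySem.List.foldl_append_eq_flatMap]
    rfl
  rw [this]

theorem runB_state_nil (ags : List Int) : ∀ k : Int, runB ags k [] = [] := by
  induction ags with
  | nil => intro k; rfl
  | cons a ags ih => intro k; rw [runB_cons]; exact ih (k - 1)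

theorem runB_append (ags : List Int) : ∀ (k : Int) S1 S2,
    runB ags k (S1 ++ S2) = runB ags k S1 ++ runB ags k S2 := by
  induction ags with
  | nil => intros; rfl
  | cons a ags ih =>
    intro k S1 S2
    rw [runB_cons, runB_cons, runB_cons, List.flatMap_append, ih]

theorem runB_flatMap {γ : Type} (ags : List Int) (k : Int) (S : List γ)
    (f : γ → List (List Int × List (Int × List Int))) :
    runB ags k (S.flatMap f) = S.flatMap (fun c => runB ags k (f c)) := by
  induction S with
  | nil => exact runB_state_nil ags k
  | cons x S ih => rw [List.flatMap_cons, List.flatMap_cons, runB_append, ih]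

theorem map_eq_flatMap_singleton {γ δ : Type} (S : List γ) (g : γ → δ) :
    S.map g = S.flatMap (fun c => [g c]) := by
  induction S with
  | nil => rfl
  | cons x S ih => simp only [List.map_cons, List.flatMap_cons, ih]; rfl

theorem runB_map {γ : Type} (ags : List Int) (k : Int) (S : List γ)
    (g : γ → List Int × List (Int × List Int)) :
    runB ags k (S.map g) = S.flatMap (fun c => runB ags k [g c]) := by
  rw [map_eq_flatMap_singleton S g, runB_flatMap]

-- A's loop body in 'acc ++ …' form
def partGa (a : Int) (tl : List Int) (items : List Int) (indexes : List Int) :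
    List (List (Int × List Int)) :=
  match PySem.List.pyGet? indexes 0 with
  | none => []
  | some i0 =>
    if i0 ≠ 0 then []
    else
      let st := indexes.reverse.foldl partPopStep ([], items)
      let selection := (PySem.List.slice? st.1 none none (-1)).getD []
      (part_py tl st.2).map (fun result => (PySem.Dict.insert ⟨result⟩ a selection).items)

theorem partGa_body (a : Int) (tl : List Int) (items : List Int)
    (acc : List (List (Int × List Int))) (indexes : List Int) :
    (match PySem.List.pyGet? indexes 0 with
      | none => acc
      | some i0 =>
        if i0 ≠ 0 then acc
        else
          let st := indexes.reverse.foldl partPopStep ([], items)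
          let selection := (PySem.List.slice? st.1 none none (-1)).getD []
          acc ++ (part_py tl st.2).map
            (fun result => (PySem.Dict.insert ⟨result⟩ a selection).items))
    = acc ++ partGa a tl items indexes := by
  unfold partGa
  cases h : PySem.List.pyGet? indexes 0 with
  | none => simp
  | some i0 => by_cases h0 : i0 ≠ 0 <;> simp [h0]

-- the values a comprehension 'x for i, x in enumerate(xs, s) if Q(i)' keeps
def pickIdx (Q : Int → Bool) (s : Int) : List Int → List Int
  | [] => []
  | x :: xs => if Q s then x :: pickIdx Q (s + 1) xs else pickIdx Q (s + 1) xs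

theorem filter_enumerate_eq_pickIdx (Q : Int → Bool) (xs : List Int) (s : Int) :
    ((PySem.List.enumerate xs s).filter (fun p => Q p.1)).map (·.2) = pickIdx Q s xs := by
  induction xs generalizing s with
  | nil => simp [PySem.List.enumerate_nil, pickIdx]
  | cons x xs ih =>
    rw [PySem.List.enumerate_cons]
    by_cases h : Q s <;> simp [pickIdx, h, ih]

theorem pickIdx_congr_ge {Q Q' : Int → Bool} (s : Int) (xs : List Int)
    (h : ∀ i, s ≤ i → Q i = Q' i) : pickIdx Q s xs = pickIdx Q' s xs := by
  induction xs generalizing s with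
  | nil => rfl
  | cons x xs ih =>
    rw [pickIdx, pickIdx, h s le_rfl, ih (s + 1) (fun i hi => h i (by omega))]

theorem pickIdx_true (s : Int) (xs : List Int) :
    pickIdx (fun _ => true) s xs = xs := by
  induction xs generalizing s with
  | nil => rfl
  | cons x xs ih => rw [pickIdx]; simp [ih]

theorem foldl_eraseIdx_nil (ps : List Nat) :
    ps.foldl (fun (ys : List Int) j => ys.eraseIdx j) [] = [] := by
  induction ps with
  | nil => rfl
  | cons p ps ih => simp [ih]

theorem foldl_eraseIdx_cons (ps : List Nat) (x : Int) (xs : List Int)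
    (h : ∀ p ∈ ps, 1 ≤ p) :
    ps.foldl (fun ys j => ys.eraseIdx j) (x :: xs)
      = x :: (ps.map (· - 1)).foldl (fun ys j => ys.eraseIdx j) xs := by
  induction ps generalizing xs with
  | nil => simp
  | cons p ps ih =>
    have hp : 1 ≤ p := h p (List.mem_cons_self)
    have hx : (x :: xs).eraseIdx p = x :: xs.eraseIdx (p - 1) := by
      obtain ⟨q, rfl⟩ : ∃ q, p = q + 1 := ⟨p - 1, by omega⟩
      simp [List.eraseIdx_cons_succ]
    simp only [List.foldl_cons, List.map_cons, hx]
    exact ih _ (fun q hq => h q (List.mem_cons_of_mem _ hq))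

theorem foldl_eraseIdx_length (ds : List Nat) (xs : List Int)
    (hs : ds.Pairwise (· > ·)) (hb : ∀ j ∈ ds, j < xs.length) :
    (ds.foldl (fun (ys : List Int) j => ys.eraseIdx j) xs).length = xs.length - ds.length := by
  induction ds generalizing xs with
  | nil => simp
  | cons j ds ih =>
    have hj : j < xs.length := hb j List.mem_cons_self
    have hgt : ∀ q ∈ ds, q < j := fun q hq => (List.pairwise_cons.mp hs).1 q hq
    simp only [List.foldl_cons, List.length_cons]
    rw [ih _ (List.pairwise_cons.mp hs).2 (by
      intro q hq
      rw [List.length_eraseIdx_of_lt hj]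
      have := hgt q hq; omega)]
    rw [List.length_eraseIdx_of_lt hj]
    omega

theorem pickIdx_not_mem (asc : List Nat) (xs : List Int) (s : Nat)
    (hs : asc.Pairwise (· < ·)) (hlb : ∀ j ∈ asc, s ≤ j) :
    pickIdx (fun i => !decide (i ∈ asc.map (Int.ofNat))) (s : Int) xs
      = ((asc.map (· - s)).reverse).foldl (fun ys j => ys.eraseIdx j) xs := by
  induction xs generalizing s asc with
  | nil => exact (foldl_eraseIdx_nil _).symm
  | cons x xs ih =>
    cases asc with
    | nil =>
      rw [pickIdx_congr_ge (Q' := fun _ => true) _ _ (by simp), pickIdx_true]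
      rfl
    | cons j asc' =>
      have hgt : ∀ q ∈ asc', j < q := fun q hq => (List.pairwise_cons.mp hs).1 q hq
      have hs' : asc'.Pairwise (· < ·) := (List.pairwise_cons.mp hs).2
      by_cases hje : j = s
      · rw [pickIdx]
        have hQ : (!decide ((s : Int) ∈ (j :: asc').map Int.ofNat)) = false := by
          simp [hje, Int.ofNat_eq_natCast]
        rw [hQ]
        simp only [Bool.false_eq_true, if_false]
        have hcong : pickIdx (fun i => !decide (i ∈ (j :: asc').map Int.ofNat)) ((s : Int) + 1) xs
            = pickIdx (fun i => !decide (i ∈ asc'.map Int.ofNat)) ((s + 1 : Nat) : Int) xs := by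
          rw [show ((s : Int) + 1) = ((s + 1 : Nat) : Int) by push_cast; ring]
          refine pickIdx_congr_ge _ _ (fun i hi => ?_)
          have hm : (i ∈ (j :: asc').map Int.ofNat) ↔ (i ∈ asc'.map Int.ofNat) := by
            simp only [List.map_cons, List.mem_cons]
            constructor
            · rintro (h | h)
              · exfalso; rw [h] at hi; simp only [Int.ofNat_eq_natCast, hje] at hi
                exact absurd hi (by push_cast; omega)
              · exact h
            · exact Or.inr
          simp only [hm]
        rw [hcong, ih asc' (s + 1) hs' (fun q hq => by have := hgt q hq; omega)]
        rw [show (j :: asc').map (· - s) = 0 :: asc'.map (· - s) by simp [hje]]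
        rw [List.reverse_cons, List.foldl_append]
        rw [foldl_eraseIdx_cons _ _ _ (by
          intro p hp
          simp only [List.mem_reverse, List.mem_map] at hp
          obtain ⟨q, hq, rfl⟩ := hp
          have := hgt q hq; omega)]
        simp only [List.foldl_cons, List.eraseIdx_cons_zero, List.foldl_nil,
          ← List.map_reverse, List.map_map, Function.comp_def, Nat.sub_sub]
      · have hjs : s < j := lt_of_le_of_ne (hlb j List.mem_cons_self) (Ne.symm hje)
        rw [pickIdx]
        have hQ : (!decide ((s : Int) ∈ (j :: asc').map Int.ofNat)) = true := by
          simp only [Bool.not_eq_true', decide_eq_false_iff_not]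
          intro hmem
          simp only [List.mem_map, Int.ofNat_eq_natCast] at hmem
          obtain ⟨q, hq, hcast⟩ := hmem
          have hq' : q = s := by exact_mod_cast hcast
          rcases List.mem_cons.mp hq with rfl | hq2
          · omega
          · have := hgt q hq2; omega
        rw [hQ]
        simp only [if_true]
        rw [show ((s : Int) + 1) = ((s + 1 : Nat) : Int) by push_cast; ring]
        rw [ih (j :: asc') (s + 1) hs (by
          intro q hq
          rcases List.mem_cons.mp hq with rfl | hq2
          · omega
          · have := hgt q hq2; omega)]
        rw [foldl_eraseIdx_cons _ _ _ (by
          intro p hp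
          simp only [List.mem_reverse, List.mem_map] at hp
          obtain ⟨q, hq, rfl⟩ := hp
          rcases List.mem_cons.mp hq with rfl | hq2
          · omega
          · have := hgt q hq2; omega)]
        simp only [← List.map_reverse, List.map_map, Function.comp_def, Nat.sub_sub]

theorem foldl_partPopStep (ds : List Nat) (sel xs : List Int)
    (hs : ds.Pairwise (· > ·)) (hb : ∀ j ∈ ds, j < xs.length) :
    (ds.map (Int.ofNat)).foldl partPopStep (sel, xs)
      = (sel ++ ds.map (fun j => xs.getD j 0),
         ds.foldl (fun ys j => ys.eraseIdx j) xs) := by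
  induction ds generalizing sel xs with
  | nil => simp
  | cons j ds ih =>
    have hj : j < xs.length := hb j List.mem_cons_self
    have hgt : ∀ q ∈ ds, q < j := fun q hq => (List.pairwise_cons.mp hs).1 q hq
    have hstep : partPopStep (sel, xs) (Int.ofNat j) = (sel ++ [xs.getD j 0], xs.eraseIdx j) := by
      simp only [partPopStep, Int.ofNat_eq_natCast, PySem.List.pop?_natCast xs j hj]
      rw [List.getD_eq_getElem _ _ hj]
    simp only [List.map_cons, List.foldl_cons, hstep]
    rw [ih _ _ (List.pairwise_cons.mp hs).2 (by
      intro q hq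
      rw [List.length_eraseIdx_of_lt hj]
      have := hgt q hq; omega)]
    congr 1
    simp only [List.append_assoc, List.singleton_append]
    congr 2
    refine List.map_congr_left (fun q hq => ?_)
    have hql : q < j := hgt q hq
    rw [List.getD_eq_getElem _ _ (by rw [List.length_eraseIdx_of_lt hj]; omega),
        List.getD_eq_getElem _ _ (by omega)]
    exact List.getElem_eraseIdx_of_lt _ hql

-- main invariant: from one worklist state (rem, acc), B's remaining loop + final dict build
-- produce exactly A's recursive results with acc's pairs inserted on top
theorem main_eq (tl : List Int) : ∀ (a : Int) (rem : List Int) (acc : List (Int × List Int)),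
    (tl = [] ∨ tl.length + 1 ≤ rem.length) →
    (runB ((a :: tl).dropLast) ((a :: tl).length : Int) [(rem, acc)]).map
        (fun st => (PySem.Dict.ofList (((a :: tl).getLast (List.cons_ne_nil a tl), st.1) :: st.2)).items)
      = (part_py (a :: tl) rem).map
        (fun r => (acc.foldl (fun d p => PySem.Dict.insert d p.1 p.2)
            (⟨r⟩ : PySem.Dict Int (List Int))).items) := by
  induction tl with
  | nil => intro a rem acc _; rfl
  | cons a2 rest ih =>
    intro a rem acc hlen
    have hkn : rest.length + 2 ≤ rem.length := by
      rcases hlen with h | h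
      · exact absurd h (List.cons_ne_nil a2 rest)
      · simpa using h
    have hq1 : 1 ≤ rem.length / (rest.length + 1 + 1) :=
      (Nat.one_le_div_iff (by omega)).mpr (by omega)
    obtain ⟨q, hq⟩ : ∃ q', rem.length / (rest.length + 1 + 1) = q' + 1 :=
      ⟨rem.length / (rest.length + 1 + 1) - 1, by omega⟩
    have h0n : (0 : Int) < (rem.length : Int) := by exact_mod_cast (by omega : 0 < rem.length)
    -- ---- one step of B's loop; unfold one level of A's recursion
    rw [List.dropLast_cons₂, runB_cons]
    simp only [List.flatMap_cons, List.flatMap_nil, List.append_nil]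
    simp only [part_py, altExpand, PySem.List.len_eq, List.length_cons,
      PySem.Int.floordiv_natCast]
    rw [hq]
    rw [show (((q + 1 : Nat) : Int)) - 1 = ((q : Nat) : Int) by push_cast; ring]
    simp only [Int.toNat_natCast]
    rw [show (((rest.length + 1 + 1 : Nat) : Int)) - 1 = (((a2 :: rest).length : Nat) : Int) by
      simp only [List.length_cons]; push_cast; ring]
    rw [runB_map, List.map_flatMap]
    -- ---- A's foldl as a flatMap, filtered down to the kept combinations
    rw [PySem.List.foldl_congr_mem
          (l := PySem.List.combinations (PySem.List.pyRange 0 (rem.length : Int) 1) (q + 1))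
          (g := fun acc0 indexes => acc0 ++ partGa a (a2 :: rest) rem indexes) _ _
          (fun acc0 indexes _ => partGa_body a (a2 :: rest) rem acc0 indexes),
        PySem.List.foldl_append_eq_flatMap, List.nil_append]
    rw [PySem.List.pyRange_one_cons h0n, PySem.List.combinations_cons_succ, List.flatMap_append]
    simp only [zero_add]
    have hdrop : (PySem.List.combinations (PySem.List.pyRange 1 (rem.length : Int) 1)
        (q + 1)).flatMap (partGa a (a2 :: rest) rem) = [] := by
      rw [List.flatMap_congr (g := fun _ => []) (fun c hc => by
        obtain ⟨hsub, hlenc⟩ := (PySem.List.mem_combinations_iff _ _ _).mp hc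
        cases c with
        | nil => simp at hlenc
        | cons i c' =>
          have hi : i ∈ PySem.List.pyRange 1 (rem.length : Int) 1 :=
            hsub.subset List.mem_cons_self
          rw [PySem.List.mem_pyRange_one] at hi
          unfold partGa
          simp only [PySem.List.pyGet?_zero_cons]
          simp [show i ≠ 0 by omega])]
      simp
    rw [hdrop, List.append_nil, List.map_flatMap, List.flatMap_map]
    -- ---- index both sides by Nat combinations
    rw [PySem.List.pyRange_one 1,
        show ((rem.length : Int) - 1).toNat = rem.length - 1 by omega,
        PySem.List.combinations_map, List.flatMap_map, List.flatMap_map]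
    refine List.flatMap_congr (fun cc hcc => ?_)
    obtain ⟨hsub, hlenc⟩ := (PySem.List.mem_combinations_iff _ _ _).mp hcc
    -- facts about the selected index list 0 :: (cc+1)
    have hccb : ∀ j ∈ cc, j < rem.length - 1 := fun j hj => List.mem_range.mp (hsub.subset hj)
    have hccp : cc.Pairwise (· < ·) := List.Pairwise.sublist hsub List.pairwise_lt_range
    have hccnd : cc.Nodup := hccp.imp (fun h => Nat.ne_of_lt h)
    have hpair : (0 :: cc.map (· + 1)).Pairwise (· < ·) := by
      rw [List.pairwise_cons]
      constructor
      · intro y hy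
        simp only [List.mem_map] at hy
        obtain ⟨k, _, rfl⟩ := hy
        omega
      · rw [List.pairwise_map]
        exact hccp.imp (by omega)
    have hbound : ∀ j ∈ (0 :: cc.map (· + 1)), j < rem.length := by
      intro j hj
      rcases List.mem_cons.mp hj with rfl | hj
      · omega
      · simp only [List.mem_map] at hj
        obtain ⟨k, hk, rfl⟩ := hj
        have := hccb k hk; omega
    have hmapEq : (0 : Int) :: List.map (fun k : Nat => 1 + (k : Int)) cc
        = ((0 :: cc.map (· + 1)) : List Nat).map Int.ofNat := by
      rw [List.map_cons]
      refine congrArg₂ _ rfl ?_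
      rw [List.map_map]
      refine List.map_congr_left fun k _ => ?_
      simp only [Function.comp_apply, Int.ofNat_eq_natCast]
      push_cast
      ring
    have hrevpair : ((0 :: cc.map (· + 1)).reverse).Pairwise (· > ·) :=
      List.pairwise_reverse.mpr hpair
    have hrevbound : ∀ j ∈ (0 :: cc.map (· + 1)).reverse, j < rem.length :=
      fun j hj => hbound j (List.mem_reverse.mp hj)
    -- B's set of chosen indices, as a plain list
    have h0nm : (0 : Int) ∉ List.map (fun k : Nat => 1 + (k : Int)) cc := by
      simp only [List.mem_map, not_exists]
      intro k
      omega
    have hnd2 : (List.map (fun k : Nat => 1 + (k : Int)) cc).Nodup := by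
      refine hccnd.map ?_
      intro x y h
      have h' : 1 + (x : Int) = 1 + (y : Int) := h
      omega
    have hadd : PySem.Set.add (PySem.Set.ofList (List.map (fun k : Nat => 1 + (k : Int)) cc)) 0
        = List.map (fun k : Nat => 1 + (k : Int)) cc ++ [0] := by
      rw [PySem.Set.ofList_eq_self_of_nodup _ hnd2, PySem.Set.add_eq_ite, if_neg h0nm]
    -- B's sorted(idx) is 0 :: (1+cc)
    have hsorted : PySem.List.sorted
        (List.map (fun k : Nat => 1 + (k : Int)) cc ++ [0]) (fun i => i) false
        = (0 : Int) :: List.map (fun k : Nat => 1 + (k : Int)) cc := by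
      refine PySem.List.sorted_eq_of_perm_of_pairwise_lt _ _ _
        ((List.perm_append_singleton 0 _).symm) ?_
      rw [List.pairwise_cons]
      constructor
      · intro y hy
        simp only [List.mem_map] at hy
        obtain ⟨k, _, rfl⟩ := hy
        omega
      · rw [List.pairwise_map]
        exact hccp.imp (by intro x y h; omega)
    -- B's chosen-index test, in Nat-index form
    have hQmem : ∀ i : Int,
        PySem.Set.contains (List.map (fun k : Nat => 1 + (k : Int)) cc ++ [0]) i
          = decide (i ∈ ((0 :: cc.map (· + 1)) : List Nat).map Int.ofNat) := by
      intro i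
      rw [show PySem.Set.contains (List.map (fun k : Nat => 1 + (k : Int)) cc ++ [0]) i
          = decide (i ∈ List.map (fun k : Nat => 1 + (k : Int)) cc ++ [0]) by
        simp [PySem.Set.contains]]
      refine decide_eq_decide.mpr ?_
      rw [← hmapEq]
      simp only [List.mem_append, List.mem_cons]
      tauto
    -- A's pops: selection and remainder
    have hA := foldl_partPopStep ((0 :: cc.map (· + 1)).reverse) [] rem hrevpair hrevbound
    -- reduce A's branch (0 is the first index, so the combination is kept)
    unfold partGa
    simp only [PySem.List.pyGet?_zero_cons, ne_eq, not_true_eq_false, if_false]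
    rw [hmapEq, ← List.map_reverse, hA]
    simp only [List.nil_append]
    rw [PySem.List.slice?_none_none_neg_one, Option.getD_some, ← List.map_reverse,
        List.reverse_reverse]
    -- reduce B's selection and remainder
    rw [hadd, hsorted]
    simp only [hQmem]
    rw [filter_enumerate_eq_pickIdx
          (fun i => !decide (i ∈ List.map Int.ofNat (0 :: cc.map (· + 1)))) rem 0]
    have hrem := pickIdx_not_mem (0 :: cc.map (· + 1)) rem 0 hpair (by simp)
    rw [Nat.cast_zero] at hrem
    simp only [Nat.sub_zero, List.map_id'] at hrem
    rw [hrem]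
    -- B's selection values = A's selection values
    have hselEq : ((0 : Int) :: List.map (fun k : Nat => 1 + (k : Int)) cc).map
          (fun i => PySem.List.pyGetD rem i 0)
        = (0 :: cc.map (· + 1)).map (fun j => rem.getD j 0) := by
      simp only [List.map_cons, List.map_map]
      refine congrArg₂ _ (PySem.List.pyGetD_zero ..) (List.map_congr_left fun k _ => ?_)
      simp only [Function.comp_apply]
      rw [show (1 + (k : Int)) = ((k + 1 : Nat) : Int) by push_cast; ring,
          PySem.List.pyGetD_natCast]
    rw [hselEq]
    -- the recursive worklist equals A's recursion, by the induction hypothesis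
    have hlenrem : (((0 :: cc.map (· + 1)).reverse).foldl
        (fun (ys : List Int) j => ys.eraseIdx j) rem).length = rem.length - (q + 1) := by
      rw [foldl_eraseIdx_length _ _ hrevpair hrevbound]
      simp [hlenc]
    have hlen' : rest = [] ∨ rest.length + 1
        ≤ (((0 :: cc.map (· + 1)).reverse).foldl
            (fun (ys : List Int) j => ys.eraseIdx j) rem).length := by
      refine Or.inr ?_
      rw [hlenrem]
      have hmul : (q + 1) * (rest.length + 1 + 1) ≤ rem.length := by
        rw [← hq]; exact Nat.div_mul_le_self _ _
      have hge : rest.length + 1 ≤ (q + 1) * (rest.length + 1) :=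
        Nat.le_mul_of_pos_left _ (by omega)
      have hexp : (q + 1) * (rest.length + 1 + 1) = (q + 1) * (rest.length + 1) + (q + 1) := by
        ring
      omega
    rw [show (a :: a2 :: rest).getLast (List.cons_ne_nil a (a2 :: rest))
        = (a2 :: rest).getLast (List.cons_ne_nil a2 rest) from
      List.getLast_cons (List.cons_ne_nil a2 rest)]
    rw [ih a2 _ ((a, ((0 :: cc.map (· + 1)).map (fun j => rem.getD j 0))) :: acc) hlen']
    -- fold the extra (a, sel) insertion of the accumulator into A's per-result dict
    rw [List.map_map]
    refine List.map_congr_left fun r _ => ?_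
    simp only [Function.comp_apply, List.foldl_cons]

-- ===== VERDICT (by name: the statement is the Claim_ definition above) =====
theorem part_py_alt_eq_cons (a : Int) (tl : List Int) (items : List Int) :
    part_py_alt (a :: tl) items =
      (runB ((a :: tl).dropLast) ((a :: tl).length : Int) [(items, [])]).map
        (fun st => (PySem.Dict.ofList (((a :: tl).getLast (List.cons_ne_nil a tl), st.1) :: st.2)).items) := by
  rw [part_py_alt_eq, PySem.List.pyGet?_neg_one,
      List.getLast?_eq_some_getLast (List.cons_ne_nil a tl)]

theorem part_py_spec : Claim_equal_part_py := by
  intro agents items _ hpre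
  unfold Spec_part_py
  cases agents with
  | nil => exact absurd rfl hpre.1
  | cons a tl =>
    rw [part_py_alt_eq_cons]
    have hlen : tl = [] ∨ tl.length + 1 ≤ items.length := by
      rcases hpre.2 with h | h
      · left; simpa using h
      · right; simpa using h
    rw [main_eq tl a items [] hlen]
    simp
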